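-- pv_equiv track=rewrite | github.com/luoyuqi-lab/similarity_pruning | Functions.py | LB_New_plus
-- ===== SOURCE A (Python) =====
-- def LB_New_plus(a, b, w):
--     DM = []
--     n = len(a) - 1
--     # Calculate distance for the first and last elements
--     lb_dis = (a[0] - b[0]) ** 2 + (a[-1] - b[-1]) ** 2
--     # Calculate distance matrix and sum of min distances for the rest elements
--     for i in range(1, n):
--         min_distance = float('inf')
--         for j in range(max(0, i - w), min(n, i + w + 1)):
--             distance = (a[i] - b[j]) ** 2
--             DM.append(distance)
--             if distance < min_distance:
--                 min_distance = distance
--         lb_dis += min_distance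
--     return lb_dis
-- ===== SOURCE B (Python) =====
-- # Sliding sorted window over b with binary search for the nearest value:
-- # each window [max(0,i-w), min(n,i+w+1)) differs from the previous one by a few
-- # boundary elements, so we maintain it as a sorted list and find the closest
-- # b-value to a[i] by bisection instead of rescanning the whole window.
--
-- def _bisect_left(s, x):
--     # standard bisect_left (bisect module not imported by the original file)
--     lo, hi = 0, len(s)
--     while lo < hi:
--         mid = (lo + hi) // 2
--         if s[mid] < x:
--             lo = mid + 1
--         else:
--             hi = mid
--     return lo
--
-- def LB_New_plus(a, b, w):
--     n = len(a) - 1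
--     total = (a[0] - b[0]) ** 2 + (a[-1] - b[-1]) ** 2
--     win = []          # sorted copy of b[lo:hi], the current window
--     lo = 0
--     hi = 0
--     for i in range(1, n):
--         new_lo = max(0, i - w)
--         new_hi = min(n, i + w + 1)
--         for k in range(hi, new_hi):          # grow on the right
--             y = b[k]
--             win.insert(_bisect_left(win, y), y)
--         for k in range(lo, new_lo):          # shrink on the left
--             del win[_bisect_left(win, b[k])]
--         lo = new_lo
--         hi = new_hi
--         x = a[i]
--         p = _bisect_left(win, x)
--         if p < len(win):
--             best = (x - win[p]) ** 2
--             if p > 0: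
--                 d = (x - win[p - 1]) ** 2
--                 if d < best:
--                     best = d
--         else:
--             best = (x - win[p - 1]) ** 2
--         total += best
--     return total
-- ===== Notes on version B (the rewrite author's own statement) =====
-- stated objective: faster
-- what changed: Instead of rescanning the whole window and squaring every element for each i, B maintains the window b[lo:hi] as a sliding sorted list and finds the nearest b-value to a[i] by binary search, squaring only the one or two neighbours of the insertion point (and drops A's unused DM list).
-- outside the precondition, e.g. on LB_New_plus([3, 50, -44, 37], [7], -1): A returns inf, B raises IndexError
import Mathlib
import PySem

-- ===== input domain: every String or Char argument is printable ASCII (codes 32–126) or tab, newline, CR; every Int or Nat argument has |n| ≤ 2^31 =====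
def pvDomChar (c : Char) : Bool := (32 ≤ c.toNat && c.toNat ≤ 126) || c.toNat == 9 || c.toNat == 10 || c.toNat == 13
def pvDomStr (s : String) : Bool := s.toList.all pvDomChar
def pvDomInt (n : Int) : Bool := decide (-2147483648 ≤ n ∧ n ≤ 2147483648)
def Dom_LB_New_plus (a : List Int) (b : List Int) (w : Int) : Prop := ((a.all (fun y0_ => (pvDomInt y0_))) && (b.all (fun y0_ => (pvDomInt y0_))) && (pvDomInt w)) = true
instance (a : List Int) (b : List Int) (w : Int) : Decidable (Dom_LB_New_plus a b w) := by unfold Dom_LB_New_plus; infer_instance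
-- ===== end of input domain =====

-- B replaces A's full rescan of each window by a sliding sorted window over b with a
-- binary search for the value nearest to a[i] (objective: faster; measured).


-- ===== PORT A =====
-- A-side helper: the inner j-loop of A (running minimum over the window); Python's
-- float('inf') sentinel is `none` (a final `none`, i.e. an empty window, makes Python
-- return float('inf'), a non-int — outside Pre_).  A's DM list is write-only (appended,
-- never read), so it is omitted.
def pvAmin (a b : List Int) (n w i : Int) : Option Int :=
  (PySem.List.pyRange (max 0 (i - w)) (min n (i + w + 1))).foldl
    (fun md j =>
      let d := (PySem.List.pyGetD a i 0 - PySem.List.pyGetD b j 0) ^ 2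
      match md with
      | none => some d
      | some m => if d < m then some d else some m) none

-- a[0]/b[0]/a[-1]/b[-1] on empty a/b raise IndexError in Python (outside Pre_);
-- pyGetD's default 0 is arbitrary there, likewise `.getD 0` for the inf sentinel.
def LB_New_plus (a : List Int) (b : List Int) (w : Int) : Int :=
  let n : Int := (a.length : Int) - 1
  let lb0 : Int :=
    (PySem.List.pyGetD a 0 0 - PySem.List.pyGetD b 0 0) ^ 2 +
    (PySem.List.pyGetD a (-1) 0 - PySem.List.pyGetD b (-1) 0) ^ 2
  (PySem.List.pyRange 1 n).foldl (fun lb i => lb + (pvAmin a b n w i).getD 0) lb0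

-- ===== PORT B =====
-- Source B's hand-written `_bisect_left` is exactly the standard bisect_left loop and is
-- ported as PySem.List.bisectLeft.  `win.insert(p, y)` is List.insertIdx (exact for
-- 0 ≤ p ≤ len(win), which bisect_left guarantees); `del win[p]` is List.eraseIdx
-- (exact for p < len(win); p = len(win) is an IndexError in Python, unreachable in Pre_).
def pvInsort (win : List Int) (y : Int) : List Int :=
  win.insertIdx (PySem.List.bisectLeft win y) y

def pvDelete (win : List Int) (y : Int) : List Int :=
  win.eraseIdx (PySem.List.bisectLeft win y)

-- the `for k in range(hi, new_hi)` grow loop of Source B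
def pvGrow (b : List Int) (h h' : Int) (win : List Int) : List Int :=
  (PySem.List.pyRange h h').foldl (fun win k => pvInsort win (PySem.List.pyGetD b k 0)) win

-- the `for k in range(lo, new_lo)` shrink loop of Source B
def pvShrink (b : List Int) (l l' : Int) (win : List Int) : List Int :=
  (PySem.List.pyRange l l').foldl (fun win k => pvDelete win (PySem.List.pyGetD b k 0)) win

-- the nearest-neighbour lookup of Source B; win[p]/win[p-1] are in range whenever the
-- window is nonempty (inside Pre_), pyGetD's default 0 is arbitrary outside that
def pvBest (win : List Int) (x : Int) : Int :=
  let p := PySem.List.bisectLeft win x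
  if p < win.length then
    let best0 := (x - PySem.List.pyGetD win (p : Int) 0) ^ 2
    if 0 < p then
      let d := (x - PySem.List.pyGetD win ((p : Int) - 1) 0) ^ 2
      if d < best0 then d else best0
    else best0
  else
    (x - PySem.List.pyGetD win ((p : Int) - 1) 0) ^ 2

-- one iteration of Source B's main loop; the state is (win, lo, hi, total)
def pvBstep (a b : List Int) (n w : Int)
    (st : List Int × Int × Int × Int) (i : Int) : List Int × Int × Int × Int :=
  let win := st.1
  let lo := st.2.1
  let hi := st.2.2.1
  let total := st.2.2.2
  let newLo := max 0 (i - w)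
  let newHi := min n (i + w + 1)
  let win2 := pvShrink b lo newLo (pvGrow b hi newHi win)
  (win2, newLo, newHi, total + pvBest win2 (PySem.List.pyGetD a i 0))

def LB_New_plus_alt (a : List Int) (b : List Int) (w : Int) : Int :=
  let n : Int := (a.length : Int) - 1
  let total0 : Int :=
    (PySem.List.pyGetD a 0 0 - PySem.List.pyGetD b 0 0) ^ 2 +
    (PySem.List.pyGetD a (-1) 0 - PySem.List.pyGetD b (-1) 0) ^ 2
  ((PySem.List.pyRange 1 n).foldl (pvBstep a b n w)
    (([] : List Int), (0 : Int), (0 : Int), total0)).2.2.2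

-- ===== PRECONDITION & SPEC =====
-- Pre_ excludes exactly the inputs where Python's A does not return an int: empty a or b
-- and b shorter than the window reach (IndexError), and w < 0 with len(a) ≥ 3, where every
-- window is empty and A returns float('inf'), a float.
def Pre_LB_New_plus (a : List Int) (b : List Int) (w : Int) : Prop :=
  a ≠ [] ∧ b ≠ [] ∧ (a.length ≤ 2 ∨ (0 ≤ w ∧ (a.length : Int) - 1 ≤ (b.length : Int)))
instance (a : List Int) (b : List Int) (w : Int) : Decidable (Pre_LB_New_plus a b w) := by
  unfold Pre_LB_New_plus; infer_instance

def pvWitness_LB_New_plus : List Int × List Int × Int := ([0, 1, 2], [1, 1], 1)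

def Spec_LB_New_plus (a : List Int) (b : List Int) (w : Int) (out : Int) : Prop :=
  out = LB_New_plus_alt a b w
instance (a : List Int) (b : List Int) (w : Int) (out : Int) :
    Decidable (Spec_LB_New_plus a b w out) := by unfold Spec_LB_New_plus; infer_instance

-- ===== CLAIM (what is proved, stated in full; the proofs are below) =====
def Claim_equal_LB_New_plus : Prop := ∀ (a : List Int) (b : List Int) (w : Int),
  Dom_LB_New_plus a b w → Pre_LB_New_plus a b w →
    Spec_LB_New_plus a b w (LB_New_plus a b w)

-- ===== LEMMAS AND PROOFS =====

-- the window b[l:h] as a list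
def pvW (b : List Int) (l h : Int) : List Int := (b.drop l.toNat).take (h - l).toNat

lemma pvRange_nil {a b : Int} (h : b ≤ a) : PySem.List.pyRange a b = [] := by
  simp [PySem.List.pyRange]; omega

lemma pvW_len (b : List Int) {l h : Int} (h0 : 0 ≤ l) (h2 : h ≤ (b.length : Int)) :
    (pvW b l h).length = (h - l).toNat := by
  simp [pvW]; omega

lemma pvW_cons (b : List Int) {l h : Int} (h0 : 0 ≤ l) (hlh : l < h)
    (hlen : h ≤ (b.length : Int)) :
    pvW b l h = PySem.List.pyGetD b l 0 :: pvW b (l + 1) h := by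
  have hl : l.toNat < b.length := by omega
  have e1 : (l + 1).toNat = l.toNat + 1 := by omega
  have e2 : (h - l).toNat = ((h - (l + 1)).toNat) + 1 := by omega
  rw [pvW, pvW, e1, e2, List.drop_eq_getElem_cons hl, List.take_succ_cons,
    PySem.List.pyGetD_eq_getElem b 0 h0 (by omega)]

lemma pvW_snoc (b : List Int) {l h : Int} (h0 : 0 ≤ l) (hlh : l ≤ h)
    (hlen : h < (b.length : Int)) :
    pvW b l (h + 1) = pvW b l h ++ [PySem.List.pyGetD b h 0] := by
  have h1 : (h + 1 - l).toNat = ((h - l).toNat) + 1 := by omega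
  rw [pvW, h1, List.take_add_one]
  have hidx : (h - l).toNat < (b.drop l.toNat).length := by simp; omega
  rw [List.getElem?_eq_getElem hidx, pvW]
  have e : l.toNat + (h - l).toNat = h.toNat := by omega
  rw [PySem.List.pyGetD_eq_getElem b 0 (by omega : (0:Int) ≤ h) (by omega)]
  simp [List.getElem_drop, e]

-- running minimum: characterisation of A's inner fold
lemma pvMin_some (l : List Int) : ∀ (m : Int),
    ∃ m', l.foldl (fun md d => match md with
      | none => some d
      | some m => if d < m then some d else some m) (some m) = some m' ∧
      m' ∈ m :: l ∧ ∀ y ∈ m :: l, m' ≤ y := by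
  induction l with
  | nil => intro m; exact ⟨m, rfl, by simp, by simp⟩
  | cons d t ih =>
    intro m
    obtain ⟨m', he, hmem, hb⟩ := ih (if d < m then d else m)
    have e : (if d < m then some d else some m) = some (if d < m then d else m) :=
      (apply_ite some (d < m) d m).symm
    refine ⟨m', ?_, ?_, ?_⟩
    · rw [List.foldl_cons]
      show List.foldl _ (if d < m then some d else some m) t = some m'
      rw [e]; exact he
    · rcases List.mem_cons.1 hmem with h | h
      · by_cases hc : d < m
        · rw [h, if_pos hc]; simp
        · rw [h, if_neg hc]; simp
      · simp [h]
    · intro y hy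
      have hbm : m' ≤ (if d < m then d else m) := hb _ (List.mem_cons_self ..)
      rcases List.mem_cons.1 hy with h | hy'
      · rw [h]; by_cases hc : d < m <;> simp [hc] at hbm <;> omega
      · rcases List.mem_cons.1 hy' with h | hy''
        · rw [h]; by_cases hc : d < m <;> simp [hc] at hbm <;> omega
        · exact hb _ (List.mem_cons_of_mem _ hy'')

lemma pvMin_nonempty {l : List Int} (h : l ≠ []) :
    ∃ m', l.foldl (fun md d => match md with
      | none => some d
      | some m => if d < m then some d else some m) none = some m' ∧
      m' ∈ l ∧ ∀ y ∈ l, m' ≤ y := by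
  cases l with
  | nil => exact absurd rfl h
  | cons d t =>
    obtain ⟨m', he, hmem, hb⟩ := pvMin_some t d
    exact ⟨m', by simpa using he, hmem, hb⟩

lemma pvMin_unique {L : List Int} {m1 m2 : Int} (h1 : m1 ∈ L) (b1 : ∀ y ∈ L, m1 ≤ y)
    (h2 : m2 ∈ L) (b2 : ∀ y ∈ L, m2 ≤ y) : m1 = m2 :=
  le_antisymm (b1 m2 h2) (b2 m1 h1)

-- reading b along a range is the window list
lemma pvMap_range (b : List Int) (f : Int → Int) : ∀ (m : Nat) {l h : Int}, 0 ≤ l →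
    h ≤ (b.length : Int) → (h - l).toNat = m →
    (PySem.List.pyRange l h).map (fun j => f (PySem.List.pyGetD b j 0)) = (pvW b l h).map f := by
  intro m
  induction m with
  | zero =>
    intro l h h0 hlen hm
    rw [pvRange_nil (by omega), pvW]
    simp [hm]
  | succ k ih =>
    intro l h h0 hlen hm
    rw [PySem.List.pyRange_one_cons (by omega), pvW_cons b h0 (by omega) hlen]
    simp only [List.map_cons]
    rw [ih (by omega) hlen (by omega)]

lemma pvMono {win : List Int} (hs : List.Pairwise (· ≤ ·) win) {i j : Nat}
    (hij : i ≤ j) (hj : j < win.length) : win[i]'(by omega) ≤ win[j] := by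
  rcases Nat.eq_or_lt_of_le hij with h | h
  · subst h; exact le_refl _
  · exact List.pairwise_iff_getElem.1 hs i j (by omega) hj h

lemma pvGet_nat (win : List Int) (p : Nat) (hp : p < win.length) :
    PySem.List.pyGetD win (p : Int) 0 = win[p] := by
  rw [PySem.List.pyGetD_eq_getElem win 0 (by omega) (by exact_mod_cast hp)]
  simp

lemma pvGet_pred (win : List Int) (p : Nat) (h0 : 0 < p) (hp : p ≤ win.length) :
    PySem.List.pyGetD win ((p : Int) - 1) 0 = win[p - 1]'(by omega) := by
  rw [PySem.List.pyGetD_eq_getElem win 0 (by omega) (by omega)]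
  congr 1
  omega

lemma pvInsort_sorted (win : List Int) (y : Int) (hs : List.Pairwise (· ≤ ·) win) :
    List.Pairwise (· ≤ ·) (pvInsort win y) ∧ (pvInsort win y).Perm (y :: win) := by
  obtain ⟨hple, hlt, hge⟩ := PySem.List.bisectLeft_spec win y hs
  set p := PySem.List.bisectLeft win y with hp
  have hlen : (win.insertIdx p y).length = win.length + 1 :=
    List.length_insertIdx_of_le_length hple y
  constructor
  · rw [pvInsort, List.pairwise_iff_getElem]
    intro i j hi hj hij
    rw [hlen] at hi hj
    rw [List.getElem_insertIdx (by omega), List.getElem_insertIdx (by omega)]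
    split_ifs
    all_goals first
      | (exfalso; omega)
      | exact pvMono hs (by omega) (by omega)
      | exact le_of_lt (hlt _ (by omega) (by omega))
      | exact hge _ (by omega) (by omega)
  · exact List.perm_insertIdx y win hple

lemma pvDelete_sorted (win : List Int) (y : Int) (hs : List.Pairwise (· ≤ ·) win)
    (hy : y ∈ win) :
    List.Pairwise (· ≤ ·) (pvDelete win y) ∧ (y :: pvDelete win y).Perm win := by
  obtain ⟨hple, hlt, hge⟩ := PySem.List.bisectLeft_spec win y hs
  set p := PySem.List.bisectLeft win y with hp
  obtain ⟨j0, hj0, hj0e⟩ := List.mem_iff_getElem.1 hy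
  have hpj : p ≤ j0 := by
    by_contra hc
    exact absurd hj0e (by have := hlt j0 hj0 (by omega); omega)
  have hplen : p < win.length := lt_of_le_of_lt hpj hj0
  have hpy : win[p] = y := by
    have h1 : y ≤ win[p] := hge p hplen (le_refl p)
    have h2 : win[p] ≤ win[j0] := pvMono hs hpj hj0
    omega
  constructor
  · exact List.Pairwise.sublist (List.eraseIdx_sublist win p) hs
  · simp only [pvDelete, ← hp]
    have h3 := List.getElem_cons_eraseIdx_perm hplen
    rw [hpy] at h3
    exact h3

lemma pvGrow_ok (b : List Int) : ∀ (m : Nat) (win : List Int) (l h : Int),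
    List.Pairwise (· ≤ ·) win → win.Perm (pvW b l h) → 0 ≤ l → l ≤ h →
    h + (m : Int) ≤ (b.length : Int) →
    List.Pairwise (· ≤ ·) (pvGrow b h (h + (m : Int)) win) ∧
      (pvGrow b h (h + (m : Int)) win).Perm (pvW b l (h + (m : Int))) := by
  intro m
  induction m with
  | zero =>
    intro win l h hsrt hperm h0 hlh hlen
    rw [pvGrow, pvRange_nil (by omega)]
    simpa using ⟨hsrt, hperm⟩
  | succ k ih =>
    intro win l h hsrt hperm h0 hlh hlen
    have e1 : h + ((k : Int) + 1) = (h + (k : Int)) + 1 := by ring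
    have e2 : ((k + 1 : Nat) : Int) = (k : Int) + 1 := by push_cast; ring
    rw [e2, e1, pvGrow,
      PySem.List.pyRange_one_succ_right (by omega), List.foldl_append]
    obtain ⟨ihs, ihp⟩ := ih win l h hsrt hperm h0 hlh (by omega)
    rw [pvGrow] at ihs ihp
    simp only [List.foldl_cons, List.foldl_nil]
    set res := (PySem.List.pyRange h (h + (k:Int))).foldl
      (fun win k => pvInsort win (PySem.List.pyGetD b k 0)) win with hres
    obtain ⟨s2, p2⟩ := pvInsort_sorted res (PySem.List.pyGetD b (h + (k:Int)) 0) ihs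
    refine ⟨s2, ?_⟩
    rw [pvW_snoc b h0 (by omega) (by omega)]
    exact p2.trans ((ihp.cons _).trans
      (List.perm_append_singleton _ _).symm)

lemma pvShrink_ok (b : List Int) : ∀ (m : Nat) (win : List Int) (l h : Int),
    List.Pairwise (· ≤ ·) win → win.Perm (pvW b l h) → 0 ≤ l →
    l + (m : Int) ≤ h → h ≤ (b.length : Int) →
    List.Pairwise (· ≤ ·) (pvShrink b l (l + (m : Int)) win) ∧
      (pvShrink b l (l + (m : Int)) win).Perm (pvW b (l + (m : Int)) h) := by
  intro m
  induction m with
  | zero =>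
    intro win l h hsrt hperm h0 hlh hlen
    rw [pvShrink, pvRange_nil (by omega)]
    simpa using ⟨hsrt, hperm⟩
  | succ k ih =>
    intro win l h hsrt hperm h0 hlh hlen
    have e2 : ((k + 1 : Nat) : Int) = (k : Int) + 1 := by push_cast; ring
    rw [e2] at *
    have hcons : pvW b l h = PySem.List.pyGetD b l 0 :: pvW b (l + 1) h :=
      pvW_cons b h0 (by omega) hlen
    have hy : PySem.List.pyGetD b l 0 ∈ win :=
      (hperm.mem_iff).2 (by rw [hcons]; exact List.mem_cons_self ..)
    obtain ⟨s1, p1⟩ := pvDelete_sorted win (PySem.List.pyGetD b l 0) hsrt hy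
    have p2 : (pvDelete win (PySem.List.pyGetD b l 0)).Perm (pvW b (l + 1) h) := by
      have h4 := p1.trans (hperm.trans (by rw [hcons]))
      exact h4.cons_inv
    rw [pvShrink, PySem.List.pyRange_one_cons (by omega)]
    simp only [List.foldl_cons]
    have e3 : l + ((k : Int) + 1) = (l + 1) + (k : Int) := by ring
    have h5 := ih (pvDelete win (PySem.List.pyGetD b l 0)) (l + 1) h s1 p2 (by omega)
      (by omega) hlen
    rw [pvShrink] at h5
    rw [e3]
    exact h5

lemma pvSqMono_right {x u v : Int} (h1 : x ≤ u) (h2 : u ≤ v) : (x - u) ^ 2 ≤ (x - v) ^ 2 := by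
  nlinarith

lemma pvSqMono_left {x u v : Int} (h1 : u ≤ v) (h2 : v ≤ x) : (x - v) ^ 2 ≤ (x - u) ^ 2 := by
  nlinarith

-- the nearest-neighbour lookup computes the minimum of (x - y)^2 over the window
lemma pvBest_isMin (win : List Int) (x : Int) (hs : List.Pairwise (· ≤ ·) win)
    (hne : win ≠ []) :
    pvBest win x ∈ win.map (fun y => (x - y) ^ 2) ∧
      ∀ z ∈ win.map (fun y => (x - y) ^ 2), pvBest win x ≤ z := by
  obtain ⟨hple, hlt, hge⟩ := PySem.List.bisectLeft_spec win x hs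
  have hlen : 0 < win.length := List.length_pos_iff.2 hne
  rw [pvBest]
  set p := PySem.List.bisectLeft win x with hp
  simp only
  by_cases hcase : p < win.length
  · rw [if_pos hcase, pvGet_nat win p hcase]
    have hxp : x ≤ win[p] := hge p hcase (le_refl p)
    by_cases hpos : 0 < p
    · rw [if_pos hpos, pvGet_pred win p hpos hple]
      have hpx : win[p-1]'(by omega) < x := hlt (p-1) (by omega) (by omega)
      constructor
      · split_ifs
        · exact List.mem_map.2 ⟨win[p-1]'(by omega), List.getElem_mem _, rfl⟩
        · exact List.mem_map.2 ⟨win[p], List.getElem_mem _, rfl⟩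
      · intro z hz
        obtain ⟨y, hy, rfl⟩ := List.mem_map.1 hz
        obtain ⟨j, hj, rfl⟩ := List.mem_iff_getElem.1 hy
        by_cases hjp : j < p
        · have h1 : win[j] ≤ win[p-1]'(by omega) := pvMono hs (by omega) (by omega)
          have h2 : (x - win[p-1]'(by omega)) ^ 2 ≤ (x - win[j]) ^ 2 :=
            pvSqMono_left h1 (le_of_lt hpx)
          split_ifs <;> omega
        · have h1 : win[p] ≤ win[j] := pvMono hs (by omega) hj
          have h2 : (x - win[p]) ^ 2 ≤ (x - win[j]) ^ 2 := pvSqMono_right hxp h1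
          split_ifs <;> omega
    · rw [if_neg hpos]
      constructor
      · exact List.mem_map.2 ⟨win[p], List.getElem_mem _, rfl⟩
      · intro z hz
        obtain ⟨y, hy, rfl⟩ := List.mem_map.1 hz
        obtain ⟨j, hj, rfl⟩ := List.mem_iff_getElem.1 hy
        exact pvSqMono_right hxp (pvMono hs (by omega) hj)
  · rw [if_neg hcase]
    have hpos : 0 < p := by omega
    rw [pvGet_pred win p hpos hple]
    have hpx : win[p-1]'(by omega) < x := hlt (p-1) (by omega) (by omega)
    constructor
    · exact List.mem_map.2 ⟨win[p-1]'(by omega), List.getElem_mem _, rfl⟩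
    · intro z hz
      obtain ⟨y, hy, rfl⟩ := List.mem_map.1 hz
      obtain ⟨j, hj, rfl⟩ := List.mem_iff_getElem.1 hy
      exact pvSqMono_left (pvMono hs (by omega) (by omega)) (le_of_lt hpx)

-- loop invariant for B's state before processing index i
def pvInv (b : List Int) (n w i : Int) (st : List Int × Int × Int × Int) : Prop :=
  List.Pairwise (· ≤ ·) st.1 ∧ st.1.Perm (pvW b st.2.1 st.2.2.1) ∧
    0 ≤ st.2.1 ∧ st.2.1 ≤ st.2.2.1 ∧ st.2.1 ≤ max 0 (i - w) ∧ st.2.2.1 ≤ min n (i + w + 1)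

lemma pvStep (a b : List Int) (n w i : Int) (st : List Int × Int × Int × Int)
    (hn : n = (a.length : Int) - 1) (h1 : 1 ≤ i) (h2 : i < n) (hw : 0 ≤ w)
    (hbn : n ≤ (b.length : Int)) (hInv : pvInv b n w i st) :
    pvInv b n w (i + 1) (pvBstep a b n w st i) ∧
      (pvBstep a b n w st i).2.2.2 = st.2.2.2 + (pvAmin a b n w i).getD 0 := by
  obtain ⟨hs, hperm, h0lo, hlohi, hloB, hhiB⟩ := hInv
  have hblen : n ≤ (b.length : Int) := hbn
  have hNL0 : (0:Int) ≤ max 0 (i - w) := le_max_left _ _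
  have hNLi : max 0 (i - w) ≤ i := by omega
  have hNHi : i + 1 ≤ min n (i + w + 1) := by omega
  have hNH : min n (i + w + 1) ≤ n := min_le_left _ _
  -- grow
  have egrow : st.2.2.1 + (((min n (i + w + 1)) - st.2.2.1).toNat : Int) = min n (i + w + 1) := by
    omega
  obtain ⟨gs, gp⟩ := pvGrow_ok b ((min n (i + w + 1)) - st.2.2.1).toNat st.1 st.2.1 st.2.2.1
    hs hperm h0lo hlohi (by omega)
  rw [egrow] at gs gp
  -- shrink
  have eshr : st.2.1 + (((max 0 (i - w)) - st.2.1).toNat : Int) = max 0 (i - w) := by omega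
  obtain ⟨ss, sp⟩ := pvShrink_ok b ((max 0 (i - w)) - st.2.1).toNat _ st.2.1 (min n (i + w + 1))
    gs gp h0lo (by omega) (by omega)
  rw [eshr] at ss sp
  set win2 := pvShrink b st.2.1 (max 0 (i - w)) (pvGrow b st.2.2.1 (min n (i + w + 1)) st.1)
    with hwin2
  -- window is nonempty
  have hWlen : (pvW b (max 0 (i - w)) (min n (i + w + 1))).length =
      ((min n (i + w + 1)) - (max 0 (i - w))).toNat := pvW_len b hNL0 (by omega)
  have hne : win2 ≠ [] := by
    intro hnil
    have := sp.length_eq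
    rw [hnil, hWlen] at this
    simp at this
    omega
  -- B's best is the min over the window
  obtain ⟨bmem, bbnd⟩ := pvBest_isMin win2 (PySem.List.pyGetD a i 0) ss hne
  -- A's inner loop is the min over the same window
  have hAeq : pvAmin a b n w i =
      ((PySem.List.pyRange (max 0 (i - w)) (min n (i + w + 1))).map
        (fun j => (PySem.List.pyGetD a i 0 - PySem.List.pyGetD b j 0) ^ 2)).foldl
        (fun md d => match md with
          | none => some d
          | some m => if d < m then some d else some m) none := by
    rw [pvAmin, List.foldl_map]
  have hmapW : (PySem.List.pyRange (max 0 (i - w)) (min n (i + w + 1))).map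
      (fun j => (PySem.List.pyGetD a i 0 - PySem.List.pyGetD b j 0) ^ 2) =
      (pvW b (max 0 (i - w)) (min n (i + w + 1))).map
        (fun y => (PySem.List.pyGetD a i 0 - y) ^ 2) :=
    pvMap_range b (fun y => (PySem.List.pyGetD a i 0 - y) ^ 2)
      (((min n (i + w + 1)) - (max 0 (i - w))).toNat) hNL0 (by omega) rfl
  have hWne : (pvW b (max 0 (i - w)) (min n (i + w + 1))).map
      (fun y => (PySem.List.pyGetD a i 0 - y) ^ 2) ≠ [] := by
    intro hnil
    have := congrArg List.length hnil
    rw [List.length_map, hWlen] at this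
    simp at this
    omega
  obtain ⟨mA, hmA, hmAmem, hmAbnd⟩ := pvMin_nonempty hWne
  -- the two minima agree (transport along the permutation win2 ~ window)
  have hpermMap := sp.map (fun y => (PySem.List.pyGetD a i 0 - y) ^ 2)
  have hbest : pvBest win2 (PySem.List.pyGetD a i 0) = mA :=
    pvMin_unique bmem bbnd (hpermMap.mem_iff.2 hmAmem)
      (fun y hy => hmAbnd y (hpermMap.mem_iff.1 hy))
  have hstep : pvBstep a b n w st i = (win2, max 0 (i - w), min n (i + w + 1),
      st.2.2.2 + pvBest win2 (PySem.List.pyGetD a i 0)) := rfl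
  rw [hstep]
  constructor
  · refine ⟨ss, sp, ?_, ?_, ?_, ?_⟩
    · show (0:Int) ≤ max 0 (i - w); omega
    · show max 0 (i - w) ≤ min n (i + w + 1); omega
    · show max 0 (i - w) ≤ max 0 (i + 1 - w); omega
    · show min n (i + w + 1) ≤ min n (i + 1 + w + 1); omega
  · show st.2.2.2 + pvBest win2 (PySem.List.pyGetD a i 0) = _
    rw [hbest, hAeq, hmapW, hmA]
    rfl

lemma pvLoop (a b : List Int) (n w : Int) (t0 : Int)
    (hn : n = (a.length : Int) - 1) (hw : 0 ≤ w) (hbn : n ≤ (b.length : Int)) :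
    ∀ (m : Nat), 1 + (m : Int) ≤ n →
    pvInv b n w (1 + (m : Int))
        ((PySem.List.pyRange 1 (1 + (m : Int))).foldl (pvBstep a b n w) ([], 0, 0, t0)) ∧
      ((PySem.List.pyRange 1 (1 + (m : Int))).foldl (pvBstep a b n w) ([], 0, 0, t0)).2.2.2 =
        (PySem.List.pyRange 1 (1 + (m : Int))).foldl
          (fun lb i => lb + (pvAmin a b n w i).getD 0) t0 := by
  intro m
  induction m with
  | zero =>
    intro hm
    rw [show ((0:Nat):Int) = 0 from rfl]
    rw [pvRange_nil (by omega)]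
    simp only [List.foldl_nil]
    have hperm0 : ([] : List Int).Perm (pvW b 0 0) := by
      have hW0 : pvW b 0 0 = [] := by simp [pvW]
      rw [hW0]
    refine ⟨⟨List.Pairwise.nil, hperm0, ?_, ?_, ?_, ?_⟩, trivial⟩
    · show (0:Int) ≤ 0; omega
    · show (0:Int) ≤ 0; omega
    · show (0:Int) ≤ max 0 (1 - w); omega
    · show (0:Int) ≤ min n (1 + w + 1); omega
  | succ k ih =>
    intro hm
    have e2 : ((k + 1 : Nat) : Int) = (k : Int) + 1 := by push_cast; ring
    have e3 : 1 + ((k : Int) + 1) = (1 + (k : Int)) + 1 := by ring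
    rw [e2, e3, PySem.List.pyRange_one_succ_right (by omega), List.foldl_append,
      List.foldl_append]
    obtain ⟨hinv, htot⟩ := ih (by omega)
    obtain ⟨hinv', htot'⟩ := pvStep a b n w (1 + (k : Int)) _ hn (by omega) (by omega)
      hw hbn hinv
    simp only [List.foldl_cons, List.foldl_nil]
    refine ⟨by rw [show 1 + (k:Int) + 1 = (1 + (k:Int)) + 1 from by ring]; exact hinv', ?_⟩
    rw [htot', htot]

-- ===== VERDICT (by name: the statement is the Claim_ definition above) =====
theorem LB_New_plus_spec : Claim_equal_LB_New_plus := by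
  intro a b w hdom hpre
  obtain ⟨ha, hb, hcase⟩ := hpre
  unfold Spec_LB_New_plus LB_New_plus LB_New_plus_alt
  simp only
  by_cases hn : (a.length : Int) - 1 ≤ 1
  · rw [pvRange_nil hn]
    rfl
  · rcases hcase with h2 | ⟨hw, hbn⟩
    · exfalso; omega
    · obtain ⟨hinv, htot⟩ := pvLoop a b ((a.length : Int) - 1) w
        ((PySem.List.pyGetD a 0 0 - PySem.List.pyGetD b 0 0) ^ 2 +
          (PySem.List.pyGetD a (-1) 0 - PySem.List.pyGetD b (-1) 0) ^ 2)
        rfl hw hbn (((a.length : Int) - 2).toNat) (by omega)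
      rw [show 1 + ((((a.length : Int) - 2).toNat : Int)) = (a.length : Int) - 1 from by omega]
        at htot
      exact htot.symm
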